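-- pv_equiv track=rewrite | github.com/TangXu-Group/Hyperspectral-Images-Classification | SpiralMamba/models/spiral_scan.py | get_hui_path4
-- ===== SOURCE A (Python) =====
-- def get_hui_path4(size): # (8, 0)出发
--     p = 0
--     q = size - 1
--     path1d = []
--     while p < q:
--         for i in range(q, p, -1):
--             path1d.append(i * size + p)
--         for i in range(p, q):
--             path1d.append(p * size + i)
--         for i in range(p, q):
--             path1d.append(i * size + q)
--         for i in range(q, p, -1):# 8,7,6,5,4,3,2,1
--             path1d.append(q * size + i)
--         p += 1
--         q -= 1
--     if q == p:
--         path1d.append(p * size + p)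
--     return path1d
-- ===== SOURCE B (Python) =====
-- def get_hui_path4(size):
--     # Cursor walk: start at (size-1, 0) heading up, rotate up->right->down->left,
--     # with the spiral's predetermined segment-length schedule: three segments of length size-1, then descending pairs.
--     if size <= 0:
--         return []
--     path = [(size - 1) * size]
--     r, c = size - 1, 0
--     dr, dc = -1, 0
--     lens = [size - 1] * 3 + [x for k in range(size - 2, 0, -1) for x in (k, k)]
--     for L in lens:
--         for _ in range(L):
--             r += dr
--             c += dc
--             path.append(r * size + c)
--         dr, dc = dc, -dr
--     return path
-- ===== Notes on version B (the rewrite author's own statement) =====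
-- stated objective: alternative
-- what changed: Replaced A's two-pointer (p,q) ring loop that emits four index-formula ranges per ring by a cursor-walk simulation: start at the bottom-left corner heading up, rotate up->right->down->left, and walk straight segments of the spiral's predetermined length schedule (three segments of length size-1, then descending pairs), appending each visited cell's flat index.
import Mathlib
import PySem

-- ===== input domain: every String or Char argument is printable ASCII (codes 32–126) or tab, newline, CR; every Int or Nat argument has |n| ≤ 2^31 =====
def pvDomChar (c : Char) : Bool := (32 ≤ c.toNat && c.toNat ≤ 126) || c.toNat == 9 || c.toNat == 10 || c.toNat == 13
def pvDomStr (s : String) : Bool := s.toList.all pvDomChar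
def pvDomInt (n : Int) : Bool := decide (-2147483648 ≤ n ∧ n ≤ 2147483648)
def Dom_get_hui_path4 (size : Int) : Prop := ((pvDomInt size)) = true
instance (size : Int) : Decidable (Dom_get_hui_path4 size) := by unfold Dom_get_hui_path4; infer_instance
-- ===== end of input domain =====

-- B replaces A's ring-formula while-loop (bounds p,q, four index formulas per ring) by a cursor
-- walk: start at (size-1,0) heading up, rotate up→right→down→left, straight segments of the
-- spiral's predetermined length schedule (three segments of length size-1, then descending pairs) (objective: alternative).

-- ===== PORT A =====
-- the while loop of A, with its two ring bounds p, q and the accumulated path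
def pvLoopA (size p q : Int) (acc : List Int) : List Int :=
  if _h : p < q then
    pvLoopA size (p + 1) (q - 1)
      (acc ++ (PySem.List.pyRange q p (-1)).map (fun i => i * size + p)
           ++ (PySem.List.pyRange p q 1).map (fun i => p * size + i)
           ++ (PySem.List.pyRange p q 1).map (fun i => i * size + q)
           ++ (PySem.List.pyRange q p (-1)).map (fun i => q * size + i))
  else if q = p then acc ++ [p * size + p] else acc
termination_by (q - p).toNat
decreasing_by omega

def get_hui_path4 (size : Int) : List Int :=
  pvLoopA size 0 (size - 1) []

-- ===== PORT B =====
-- one step of the cursor: advance by (dr,dc), append the new cell's flat index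
def pvStep (size dr dc : Int) (t : Int × Int × List Int) : Int × Int × List Int :=
  (t.1 + dr, t.2.1 + dc, t.2.2 ++ [(t.1 + dr) * size + (t.2.1 + dc)])

-- one straight segment of length L (the inner 'for _ in range(L)'), then rotate the direction
def pvSeg (size : Int) (s : Int × Int × Int × Int × List Int) (L : Int) :
    Int × Int × Int × Int × List Int :=
  match s with
  | (r, c, dr, dc, path) =>
    match (PySem.List.pyRange 0 L 1).foldl (fun t _ => pvStep size dr dc t) (r, c, path) with
    | (r', c', path') => (r', c', dc, -dr, path')

-- the segment-length schedule tail [x for k in range(b,0,-1) for x in (k,k)]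
def pvPairs (b : Int) : List Int :=
  (PySem.List.pyRange b 0 (-1)).flatMap (fun k => [k, k])

def get_hui_path4_alt (size : Int) : List Int :=
  if size ≤ 0 then []
  else
    ((List.replicate 3 (size - 1) ++ pvPairs (size - 2)).foldl (pvSeg size)
      (size - 1, 0, -1, 0, [(size - 1) * size])).2.2.2.2

-- ===== PRECONDITION & SPEC =====
def Spec_get_hui_path4 (size : Int) (out : List Int) : Prop := out = get_hui_path4_alt size
instance (size : Int) (out : List Int) : Decidable (Spec_get_hui_path4 size out) := by unfold Spec_get_hui_path4; infer_instance

-- ===== CLAIM (what is proved, stated in full; the proofs are below) =====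
def Claim_equal_get_hui_path4 : Prop := ∀ (size : Int), Dom_get_hui_path4 size → Spec_get_hui_path4 size (get_hui_path4 size)

-- ===== LEMMAS AND PROOFS =====

-- the cells a straight segment of length L emits, as a list
def pvE (size r c dr dc L : Int) : List Int :=
  (List.range L.toNat).map
    (fun (t : Nat) => (r + ((t : Int) + 1) * dr) * size + (c + ((t : Int) + 1) * dc))

-- the schedule seen on entering a ring of dimension m: [m, m-1, m-1, m-2, m-2, ..., 1, 1]
def pvSched (m : Int) : List Int := m :: pvPairs (m - 1)

theorem pvE_zero (size r c dr dc : Int) : pvE size r c dr dc 0 = [] := by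
  simp [pvE]

theorem pvE_succ (size r c dr dc L : Int) (hL : 1 ≤ L) :
    pvE size r c dr dc L
      = pvE size r c dr dc (L - 1) ++ [(r + L * dr) * size + (c + L * dc)] := by
  unfold pvE
  rw [show L.toNat = (L - 1).toNat + 1 by omega, List.range_succ, List.map_append]
  congr 1
  simp only [List.map_cons, List.map_nil, List.cons.injEq, and_true]
  rw [Int.toNat_of_nonneg (by omega : (0:Int) ≤ L - 1)]
  ring

theorem seg_fold (size dr dc : Int) : ∀ (n : Nat) (L : Int), L.toNat = n → 0 ≤ L →
    ∀ (r c : Int) (path : List Int),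
    (PySem.List.pyRange 0 L 1).foldl (fun t _ => pvStep size dr dc t) (r, c, path)
      = (r + L * dr, c + L * dc, path ++ pvE size r c dr dc L) := by
  intro n
  induction n with
  | zero =>
    intro L hn hL r c path
    have hL0 : L = 0 := by omega
    subst hL0
    rw [PySem.List.pyRange_one_eq_nil le_rfl]
    simp [pvE_zero]
  | succ k ih =>
    intro L hn hL r c path
    rw [show L = (L - 1) + 1 by ring, PySem.List.pyRange_one_succ_right (by omega : (0:Int) ≤ L - 1)]
    rw [List.foldl_append, ih (L - 1) (by omega) (by omega) r c path]
    simp only [List.foldl_cons, List.foldl_nil, pvStep]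
    rw [pvE_succ size r c dr dc (L - 1 + 1) (by omega)]
    simp only [add_sub_cancel_right, Prod.mk.injEq, List.append_assoc]
    refine ⟨by ring, by ring, ?_⟩
    have hx : (r + (L - 1) * dr + dr) * size + (c + (L - 1) * dc + dc)
        = (r + (L - 1 + 1) * dr) * size + (c + (L - 1 + 1) * dc) := by ring
    rw [hx]

theorem pvSeg_eq (size r c dr dc L : Int) (path : List Int) (hL : 0 ≤ L) :
    pvSeg size (r, c, dr, dc, path) L
      = (r + L * dr, c + L * dc, dc, -dr, path ++ pvE size r c dr dc L) := by
  show (match (PySem.List.pyRange 0 L 1).foldl (fun t _ => pvStep size dr dc t) (r, c, path) with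
    | (r', c', path') => (r', c', dc, -dr, path')) = _
  rw [seg_fold size dr dc L.toNat L rfl hL r c path]

theorem pairs_nil (b : Int) (hb : b ≤ 0) : pvPairs b = [] := by
  unfold pvPairs
  rw [PySem.List.pyRange_neg_one_eq_nil hb]
  rfl

theorem pairs_cons (b : Int) (hb : 0 < b) : pvPairs b = b :: b :: pvPairs (b - 1) := by
  unfold pvPairs
  rw [PySem.List.pyRange_neg_one_cons hb]
  rfl

theorem loopA_acc : ∀ (n : Nat) (size p q : Int), (q - p).toNat = n →
    ∀ (acc : List Int), pvLoopA size p q acc = acc ++ pvLoopA size p q [] := by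
  intro n
  induction n using Nat.strong_induction_on with
  | _ n ih =>
    intro size p q hn acc
    conv_lhs => rw [pvLoopA]
    conv_rhs => rw [pvLoopA]
    by_cases hpq : p < q
    · rw [dif_pos hpq, dif_pos hpq]
      rw [ih (q - 1 - (p + 1)).toNat (by omega) size (p + 1) (q - 1) rfl]
      conv_rhs => rw [ih (q - 1 - (p + 1)).toNat (by omega) size (p + 1) (q - 1) rfl]
      simp [List.append_assoc]
    · rw [dif_neg hpq, dif_neg hpq]
      by_cases hqp : q = p
      · rw [if_pos hqp, if_pos hqp]; simp
      · rw [if_neg hqp, if_neg hqp]; simp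

-- the walk from just outside ring (p,q) with the full remaining schedule emits A's rings from (p,q)
theorem ring_run : ∀ (n : Nat) (size p q : Int) (path : List Int),
    (q - p + 1).toNat = n → -1 ≤ q - p →
    ((pvSched (q - p + 1)).foldl (pvSeg size) (q + 1, p, -1, 0, path)).2.2.2.2
      = path ++ pvLoopA size p q [] := by
  intro n
  induction n using Nat.strong_induction_on with
  | _ n ih =>
    intro size p q path hn hm
    by_cases h0 : q - p + 1 = 0
    · rw [h0]
      unfold pvSched
      rw [pairs_nil _ (by omega)]
      simp only [List.foldl_cons, List.foldl_nil]
      rw [pvSeg_eq size (q + 1) p (-1) 0 0 path le_rfl, pvE_zero]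
      rw [pvLoopA, dif_neg (by omega : ¬ p < q), if_neg (by omega : ¬ q = p)]
    · by_cases h1 : q - p + 1 = 1
      · have hq : q = p := by omega
        rw [show q - p + 1 = 1 from h1]
        unfold pvSched
        rw [pairs_nil _ (by norm_num)]
        simp only [List.foldl_cons, List.foldl_nil]
        rw [pvSeg_eq size (q + 1) p (-1) 0 1 path (by norm_num)]
        have hE : pvE size (q + 1) p (-1) 0 1 = [p * size + p] := by
          unfold pvE
          rw [show ((1:Int)).toNat = 1 by norm_num, List.range_one]
          simp only [List.map_cons, List.map_nil, List.cons.injEq, and_true]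
          rw [hq]; push_cast; ring
        rw [hE]
        rw [pvLoopA, dif_neg (by omega : ¬ p < q), if_pos hq]
        simp
      · by_cases h2 : q - p + 1 = 2
        · have hq : q = p + 1 := by omega
          subst hq
          rw [show p + 1 - p + 1 = 2 by ring]
          unfold pvSched
          rw [show (2:Int) - 1 = 1 by norm_num, pairs_cons 1 one_pos, pairs_nil _ (by norm_num)]
          simp only [List.foldl_cons, List.foldl_nil]
          rw [pvSeg_eq size (p + 1 + 1) p (-1) 0 2 path (by norm_num)]
          rw [show p + 1 + 1 + 2 * (-1) = p by ring, show p + 2 * 0 = p by ring, neg_neg]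
          rw [pvSeg_eq size p p 0 1 1 _ (by norm_num)]
          rw [show p + 1 * 0 = p by ring, show p + 1 * 1 = p + 1 by ring, neg_zero]
          rw [pvSeg_eq size p (p + 1) 1 0 1 _ (by norm_num)]
          have hE1 : pvE size (p + 1 + 1) p (-1) 0 2 = [(p + 1) * size + p, p * size + p] := by
            unfold pvE
            rw [show ((2:Int)).toNat = 2 from rfl]
            rw [show List.range 2 = [0, 1] from rfl]
            simp only [List.map_cons, List.map_nil, List.cons.injEq, and_true]
            refine ⟨by push_cast; ring, by push_cast; ring⟩
          have hE2 : pvE size p p 0 1 1 = [p * size + (p + 1)] := by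
            unfold pvE
            rw [show ((1:Int)).toNat = 1 by norm_num, List.range_one]
            simp only [List.map_cons, List.map_nil, List.cons.injEq, and_true]
            push_cast; ring
          have hE3 : pvE size p (p + 1) 1 0 1 = [(p + 1) * size + (p + 1)] := by
            unfold pvE
            rw [show ((1:Int)).toNat = 1 by norm_num, List.range_one]
            simp only [List.map_cons, List.map_nil, List.cons.injEq, and_true]
            push_cast; ring
          rw [hE1, hE2, hE3]
          rw [pvLoopA, dif_pos (by omega : p < p + 1)]
          rw [pvLoopA, dif_neg (by omega : ¬ p + 1 < p + 1 - 1),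
            if_neg (by omega : ¬ p + 1 - 1 = p + 1)]
          rw [PySem.List.pyRange_neg_one_cons (by omega : p < p + 1),
            show p + 1 - 1 = p by ring, PySem.List.pyRange_neg_one_eq_nil le_rfl,
            PySem.List.pyRange_one_cons (by omega : p < p + 1),
            PySem.List.pyRange_one_eq_nil (by omega : p + 1 ≤ p + 1)]
          simp
        · -- q - p + 1 ≥ 3: peel one full ring (four segments) and recurse
          have hpq : p < q := by omega
          have hsched : pvSched (q - p + 1)
              = (q - p + 1) :: (q - p) :: (q - p) :: (q - p - 1) :: pvSched (q - p - 1) := by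
            unfold pvSched
            rw [show q - p + 1 - 1 = q - p by ring, pairs_cons (q - p) (by omega),
              pairs_cons (q - p - 1) (by omega), show q - p - 1 - 1 = q - p - 1 - 1 from rfl]
          rw [hsched]
          simp only [List.foldl_cons]
          rw [pvSeg_eq size (q + 1) p (-1) 0 (q - p + 1) path (by omega)]
          rw [show q + 1 + (q - p + 1) * (-1) = p by ring, show p + (q - p + 1) * 0 = p by ring,
            neg_neg]
          rw [pvSeg_eq size p p 0 1 (q - p) _ (by omega)]
          rw [show p + (q - p) * 0 = p by ring, show p + (q - p) * 1 = q by ring, neg_zero]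
          rw [pvSeg_eq size p q 1 0 (q - p) _ (by omega)]
          rw [show p + (q - p) * 1 = q by ring, show q + (q - p) * 0 = q by ring]
          rw [pvSeg_eq size q q 0 (-1) (q - p - 1) _ (by omega)]
          rw [show q + (q - p - 1) * 0 = q by ring, show q + (q - p - 1) * (-1) = p + 1 by ring,
            neg_zero]
          have key := ih (q - p - 1).toNat (by omega) size (p + 1) (q - 1)
            (path ++ pvE size (q + 1) p (-1) 0 (q - p + 1) ++ pvE size p p 0 1 (q - p)
              ++ pvE size p q 1 0 (q - p) ++ pvE size q q 0 (-1) (q - p - 1))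
            (by omega) (by omega)
          rw [show q - 1 - (p + 1) + 1 = q - p - 1 by ring, show q - 1 + 1 = q by ring] at key
          rw [key]
          have hA1 : pvE size (q + 1) p (-1) 0 (q - p + 1)
              = (PySem.List.pyRange q p (-1)).map (fun i => i * size + p) ++ [p * size + p] := by
            unfold pvE
            rw [PySem.List.pyRange_neg_one, List.map_map]
            rw [show (q - p + 1).toNat = (q - p).toNat + 1 by omega, List.range_succ,
              List.map_append]
            congr 1
            · apply List.map_congr_left
              intro t _
              simp only [Function.comp_apply]
              ring
            · simp only [List.map_cons, List.map_nil, List.cons.injEq, and_true]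
              rw [Int.toNat_of_nonneg (by omega : (0:Int) ≤ q - p)]
              ring
          have hA2 : pvE size p p 0 1 (q - p)
              = (PySem.List.pyRange (p + 1) q 1).map (fun i => p * size + i) ++ [p * size + q] := by
            unfold pvE
            rw [PySem.List.pyRange_one, List.map_map]
            rw [show (q - p).toNat = (q - (p + 1)).toNat + 1 by omega, List.range_succ,
              List.map_append]
            congr 1
            · apply List.map_congr_left
              intro t _
              simp only [Function.comp_apply]
              ring
            · simp only [List.map_cons, List.map_nil, List.cons.injEq, and_true]
              rw [Int.toNat_of_nonneg (by omega : (0:Int) ≤ q - (p + 1))]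
              ring
          have hA3 : pvE size p q 1 0 (q - p)
              = (PySem.List.pyRange (p + 1) q 1).map (fun i => i * size + q) ++ [q * size + q] := by
            unfold pvE
            rw [PySem.List.pyRange_one, List.map_map]
            rw [show (q - p).toNat = (q - (p + 1)).toNat + 1 by omega, List.range_succ,
              List.map_append]
            congr 1
            · apply List.map_congr_left
              intro t _
              simp only [Function.comp_apply]
              ring
            · simp only [List.map_cons, List.map_nil, List.cons.injEq, and_true]
              rw [Int.toNat_of_nonneg (by omega : (0:Int) ≤ q - (p + 1))]
              ring
          have hA4 : pvE size q q 0 (-1) (q - p - 1)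
              = (PySem.List.pyRange (q - 1) p (-1)).map (fun i => q * size + i) := by
            unfold pvE
            rw [PySem.List.pyRange_neg_one, List.map_map]
            rw [show (q - p - 1).toNat = (q - 1 - p).toNat by omega]
            apply List.map_congr_left
            intro t _
            simp only [Function.comp_apply]
            ring
          have hC2 : (PySem.List.pyRange p q 1).map (fun i => p * size + i)
              = (p * size + p) :: (PySem.List.pyRange (p + 1) q 1).map (fun i => p * size + i) := by
            rw [PySem.List.pyRange_one_cons hpq, List.map_cons]
          have hC3 : (PySem.List.pyRange p q 1).map (fun i => i * size + q)
              = (p * size + q) :: (PySem.List.pyRange (p + 1) q 1).map (fun i => i * size + q) := by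
            rw [PySem.List.pyRange_one_cons hpq, List.map_cons]
          have hC4 : (PySem.List.pyRange q p (-1)).map (fun i => q * size + i)
              = (q * size + q) :: (PySem.List.pyRange (q - 1) p (-1)).map (fun i => q * size + i) := by
            rw [PySem.List.pyRange_neg_one_cons hpq, List.map_cons]
          conv_rhs => rw [pvLoopA]
          rw [dif_pos hpq]
          conv_rhs => rw [loopA_acc (q - 1 - (p + 1)).toNat size (p + 1) (q - 1) rfl]
          rw [hA1, hA2, hA3, hA4, hC2, hC3, hC4]
          simp [List.append_assoc]

-- ===== VERDICT (by name: the statement is the Claim_ definition above) =====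
theorem get_hui_path4_spec : Claim_equal_get_hui_path4 := by
  intro size _
  unfold Spec_get_hui_path4 get_hui_path4 get_hui_path4_alt
  by_cases h0 : size ≤ 0
  · rw [if_pos h0, pvLoopA, dif_neg (by omega : ¬ (0:Int) < size - 1),
      if_neg (by omega : ¬ size - 1 = 0)]
  · rw [if_neg h0]
    have hrun := ring_run (size - 1 - 0 + 1).toNat size 0 (size - 1) [] rfl (by omega)
    rw [show size - 1 - 0 + 1 = size by ring, show size - 1 + 1 = size by ring,
      List.nil_append] at hrun
    rw [← hrun]
    by_cases h1 : size = 1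
    · subst h1; decide
    · have hsched : pvSched size = size :: (size - 1) :: (size - 1) :: pvPairs (size - 2) := by
        unfold pvSched
        rw [pairs_cons (size - 1) (by omega), show size - 1 - 1 = size - 2 by ring]
      rw [hsched]
      rw [show List.replicate 3 (size - 1) = [size - 1, size - 1, size - 1] from rfl]
      simp only [List.foldl_cons, List.cons_append, List.nil_append]
      rw [pvSeg_eq size size 0 (-1) 0 size [] (by omega)]
      rw [pvSeg_eq size (size - 1) 0 (-1) 0 (size - 1) [(size - 1) * size] (by omega)]
      rw [show size + size * (-1) = 0 by ring, show (0:Int) + size * 0 = 0 by ring,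
        show size - 1 + (size - 1) * (-1) = 0 by ring, show (0:Int) + (size - 1) * 0 = 0 by ring,
        List.nil_append]
      have hE : pvE size size 0 (-1) 0 size
          = (size - 1) * size :: pvE size (size - 1) 0 (-1) 0 (size - 1) := by
        unfold pvE
        rw [show size.toNat = (size - 1).toNat + 1 by omega, List.range_succ_eq_map,
          List.map_cons, List.map_map]
        congr 1
        · push_cast; ring
        · apply List.map_congr_left
          intro t _
          simp only [Function.comp_apply]
          push_cast; ring
      rw [hE]
      rfl
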